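-- pv_equiv track=rewrite | github.com/bob8dod/Preparing_CodingTest | Heap/programmers#42628.py | solution
-- ===== SOURCE A (Python) =====
-- from collections import defaultdict, deque
--
-- def solution(operations):
--     answer = []
--     num_dict = defaultdict(int)
--     queue = deque()
--     for o in operations:
--         if o[0] == 'I':
--             queue.append(int(o[2:]))
--             queue = deque(sorted(queue))
--         elif queue and o == 'D 1':
--             queue.pop()
--         elif queue and o == 'D -1':
--             queue.popleft()
--
--     if not queue:
--         answer = [0,0]
--     else:
--         answer = [queue[-1],queue[0]]
--
--     return answer
-- ===== SOURCE B (Python) =====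
-- def solution(operations):
--     nums = []
--     for o in operations:
--         if o[:1] == 'I':
--             nums.append(int(o[2:]))
--         elif nums and o == 'D 1':
--             nums.remove(max(nums))
--         elif nums and o == 'D -1':
--             nums.remove(min(nums))
--     return [max(nums), min(nums)] if nums else [0, 0]
-- ===== Notes on version B (the rewrite author's own statement) =====
-- stated objective: simpler
-- what changed: B keeps a plain unsorted list and deletes max/min on demand with a linear scan (nums.remove(max(nums))), instead of A's re-sorting the whole deque after every insertion and popping from the ends.
import Mathlib
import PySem

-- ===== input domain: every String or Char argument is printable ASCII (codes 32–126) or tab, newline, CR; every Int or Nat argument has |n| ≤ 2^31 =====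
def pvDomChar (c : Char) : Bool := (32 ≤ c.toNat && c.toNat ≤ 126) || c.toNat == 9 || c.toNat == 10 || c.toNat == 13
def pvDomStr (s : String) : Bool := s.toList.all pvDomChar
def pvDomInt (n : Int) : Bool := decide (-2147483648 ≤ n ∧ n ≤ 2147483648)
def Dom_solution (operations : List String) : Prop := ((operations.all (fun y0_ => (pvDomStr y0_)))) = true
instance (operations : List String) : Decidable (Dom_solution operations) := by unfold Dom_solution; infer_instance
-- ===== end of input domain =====

-- B keeps a plain unsorted list and deletes max/min on demand with a linear scan,
-- instead of A's re-sorting the whole deque after every insertion (objective: simpler).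

-- ===== PORT A =====
-- one loop iteration of A: sort-after-append on 'I x', pop the ends on 'D 1' / 'D -1'
def stepA (queue : List Int) (o : String) : List Int :=
  if PySem.Str.pyGet? o 0 = some 'I' then
    PySem.List.sorted (queue ++ [(PySem.Int.ofStr? (PySem.Str.slice o (some 2) none)).getD 0]) (fun x => x) false
  else if queue ≠ [] ∧ o = "D 1" then queue.dropLast
  else if queue ≠ [] ∧ o = "D -1" then queue.tail
  else queue

def solution (operations : List String) : List Int :=
  let queue := operations.foldl stepA []
  if queue = [] then [0, 0]
  else [(PySem.List.pyGet? queue (-1)).getD 0, (PySem.List.pyGet? queue 0).getD 0]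

-- ===== PORT B =====
-- one loop iteration of B: plain append on 'I x', remove first occurrence of max/min on 'D 1' / 'D -1'
def stepB (nums : List Int) (o : String) : List Int :=
  if PySem.Str.slice o none (some 1) = "I" then
    nums ++ [(PySem.Int.ofStr? (PySem.Str.slice o (some 2) none)).getD 0]
  else if nums ≠ [] ∧ o = "D 1" then
    (PySem.List.remove? nums ((PySem.List.max? nums (fun x => x)).getD 0)).getD nums
  else if nums ≠ [] ∧ o = "D -1" then
    (PySem.List.remove? nums ((PySem.List.min? nums (fun x => x)).getD 0)).getD nums
  else nums

def solution_alt (operations : List String) : List Int :=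
  let nums := operations.foldl stepB []
  if nums ≠ [] then
    [(PySem.List.max? nums (fun x => x)).getD 0, (PySem.List.min? nums (fun x => x)).getD 0]
  else [0, 0]

-- ===== PRECONDITION & SPEC =====
-- Pre_ excludes exactly the inputs on which Python A raises: an empty operation string
-- (IndexError on o[0]) or an 'I'-operation whose tail int(o[2:]) does not parse (ValueError).
def Pre_solution (operations : List String) : Prop :=
  ∀ o ∈ operations, o ≠ "" ∧
    (PySem.Str.pyGet? o 0 = some 'I' →
      (PySem.Int.ofStr? (PySem.Str.slice o (some 2) none)).isSome = true)
instance (operations : List String) : Decidable (Pre_solution operations) := by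
  unfold Pre_solution; infer_instance

def pvWitness_solution : List String := ["I 5", "I -3", "D 1", "I 7", "D -1"]

def Spec_solution (operations : List String) (out : List Int) : Prop := out = solution_alt operations
instance (operations : List String) (out : List Int) : Decidable (Spec_solution operations out) := by unfold Spec_solution; infer_instance

-- ===== CLAIM (what is proved, stated in full; the proofs are below) =====
def Claim_equal_solution : Prop := ∀ (operations : List String), Dom_solution operations → Pre_solution operations → Spec_solution operations (solution operations)

-- ===== LEMMAS AND PROOFS =====

lemma dropLast_cons_of_all_eq (a : Int) : ∀ (s : List Int), (∀ y ∈ s, y = a) → (a :: s).dropLast = s := by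
  intro s
  induction s with
  | nil => intro _; rfl
  | cons c v ih =>
    intro h
    have hc : c = a := h c (by simp)
    have hv : (a :: v).dropLast = v := ih (fun y hy => h y (by simp [hy]))
    calc (a :: c :: v).dropLast = a :: (c :: v).dropLast := by rw [List.dropLast_cons₂]
      _ = a :: (a :: v).dropLast := by rw [hc]
      _ = a :: v := by rw [hv]
      _ = c :: v := by rw [hc]

-- in a ≤-sorted list, erasing the first occurrence of the maximum drops the last element
lemma erase_max_eq_dropLast : ∀ (s : List Int) (m : Int), s.Pairwise (· ≤ ·) → m ∈ s →
    (∀ y ∈ s, y ≤ m) → s.erase m = s.dropLast := by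
  intro s
  induction s with
  | nil => intro m _ hm; cases hm
  | cons a t ih =>
    intro m hp hm hmax
    cases t with
    | nil =>
      have : m = a := by simpa using hm
      simp [this]
    | cons b u =>
      by_cases ha : a = m
      · have hall : ∀ y ∈ b :: u, y = a := by
          intro y hy
          have h1 : a ≤ y := (List.pairwise_cons.mp hp).1 y hy
          have h2 : y ≤ m := hmax y (by simp [hy])
          omega
        have herase : (a :: b :: u).erase m = b :: u := by simp [ha]
        rw [herase, List.dropLast_cons₂]
        have hb : b = a := hall b (by simp)
        have hu : (a :: u).dropLast = u := dropLast_cons_of_all_eq a u (fun y hy => hall y (by simp [hy]))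
        rw [hb, hu]
      · have herase : (a :: b :: u).erase m = a :: (b :: u).erase m := by
          simp [List.erase_cons, ha]
        rw [herase]
        have hm' : m ∈ b :: u := by
          rcases List.mem_cons.mp hm with h | h
          · exact absurd h.symm ha
          · exact h
        have := ih m (List.pairwise_cons.mp hp).2 hm' (fun y hy => hmax y (by simp [hy]))
        rw [this, List.dropLast_cons₂]

-- in a ≤-sorted list, erasing the first occurrence of the minimum drops the head
lemma erase_min_eq_tail (s : List Int) (m : Int) (hp : s.Pairwise (· ≤ ·)) (hm : m ∈ s)
    (hmin : ∀ y ∈ s, m ≤ y) : s.erase m = s.tail := by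
  cases s with
  | nil => cases hm
  | cons a t =>
    have ha : a = m := by
      rcases List.mem_cons.mp hm with h | h
      · omega
      · have h1 : a ≤ m := (List.pairwise_cons.mp hp).1 m h
        have h2 : m ≤ a := hmin a (by simp)
        omega
    simp [ha]

lemma last_is_max (s : List Int) (hp : s.Pairwise (· ≤ ·)) (h : s ≠ []) :
    ∀ y ∈ s, y ≤ s.getLast h := by
  induction s with
  | nil => cases h rfl
  | cons a t ih =>
    intro y hy
    cases t with
    | nil =>
      have : y = a := by simpa using hy
      simp [this]
    | cons b u =>
      rcases List.mem_cons.mp hy with h1 | h1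
      · have := (List.pairwise_cons.mp hp).1 ((b::u).getLast (by simp)) (List.getLast_mem _)
        rw [h1]
        simpa [List.getLast_cons] using this
      · have := ih (List.pairwise_cons.mp hp).2 (by simp) y h1
        simpa [List.getLast_cons] using this

-- B's branch test o[:1] == 'I' is equivalent to A's o[0] == 'I' whenever the latter does not raise
lemma branch_iff (o : String) :
    (PySem.Str.slice o none (some 1) = "I") ↔ (PySem.Str.pyGet? o 0 = some 'I') := by
  rw [← String.toList_inj]
  simp [pysem]
  rcases o.toList with _ | ⟨c, t⟩ <;> simp

lemma sorted_append_sorted (l : List Int) (x : Int) :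
    PySem.List.sorted (PySem.List.sorted l (fun y => y) false ++ [x]) (fun y => y) false
      = PySem.List.sorted (l ++ [x]) (fun y => y) false := by
  exact PySem.List.sorted_eq_sorted_of_perm _ _ _ (fun a b h => h)
    ((PySem.List.sorted_perm l (fun y => y) false).append_right [x])

lemma sorted_erase_eq (l : List Int) (m : Int) :
    PySem.List.sorted (l.erase m) (fun y => y) false
      = (PySem.List.sorted l (fun y => y) false).erase m := by
  have hperm : (l.erase m).Perm ((PySem.List.sorted l (fun y => y) false).erase m) :=
    ((PySem.List.sorted_perm l (fun y => y) false).erase m).symm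
  have hpair : ((PySem.List.sorted l (fun y => y) false).erase m).Pairwise (· ≤ ·) := by
    exact List.Pairwise.sublist (List.erase_sublist) (by simpa using PySem.List.sorted_pairwise l (fun y => y))
  calc PySem.List.sorted (l.erase m) (fun y => y) false
      = PySem.List.sorted ((PySem.List.sorted l (fun y => y) false).erase m) (fun y => y) false :=
        PySem.List.sorted_eq_sorted_of_perm _ _ _ (fun a b h => h) hperm
    _ = _ := PySem.List.sorted_eq_self_of_pairwise _ _ (by simpa using hpair)

-- loop invariant: A's queue is always sorted(B's list)
lemma step_eq (l : List Int) (o : String) :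
    stepA (PySem.List.sorted l (fun y => y) false) o
      = PySem.List.sorted (stepB l o) (fun y => y) false := by
  by_cases hI : PySem.Str.pyGet? o 0 = some 'I'
  · rw [stepA, stepB, if_pos hI, if_pos ((branch_iff o).mpr hI)]
    exact sorted_append_sorted l _
  · have hI' : ¬ PySem.Str.slice o none (some 1) = "I" := fun h => hI ((branch_iff o).mp h)
    have hnil : (PySem.List.sorted l (fun y => y) false ≠ []) ↔ (l ≠ []) := by
      constructor
      · intro h h'; apply h; rw [h']; rfl
      · intro h h'; exact h ((PySem.List.sorted_eq_nil_iff l _ _).mp h')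
    have hpair : (PySem.List.sorted l (fun y => y) false).Pairwise (· ≤ ·) := by
      simpa using PySem.List.sorted_pairwise l (fun y => y)
    by_cases hl : l = []
    · subst hl
      rw [stepA, stepB, if_neg hI, if_neg hI']
      rw [show (PySem.List.sorted ([] : List Int) (fun y => y) false) = [] from rfl]
      simp
      rfl
    · by_cases h1 : o = "D 1"
      · rw [stepA, if_neg hI, if_pos ⟨hnil.mpr hl, h1⟩]
        rw [stepB, if_neg hI', if_pos ⟨hl, h1⟩]
        obtain ⟨m, hm⟩ : ∃ m, PySem.List.max? l (fun y => y) = some m := by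
          cases hmx : PySem.List.max? l (fun y => y) with
          | none => exact absurd ((PySem.List.max?_eq_none_iff l _).mp hmx) hl
          | some m => exact ⟨m, rfl⟩
        have hmem : m ∈ l := PySem.List.max?_mem hm
        rw [hm, Option.getD_some, PySem.List.remove?_eq_some_erase l m hmem, Option.getD_some]
        rw [sorted_erase_eq l m]
        rw [erase_max_eq_dropLast _ m hpair
          ((PySem.List.mem_sorted l _ false m).mpr hmem)
          (fun y hy => PySem.List.max?_isMax hm y ((PySem.List.mem_sorted l _ false y).mp hy))]
      · by_cases h2 : o = "D -1"
        · rw [stepA, if_neg hI,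
            if_neg (show ¬((PySem.List.sorted l (fun y => y) false) ≠ [] ∧ o = "D 1") from fun h => h1 h.2),
            if_pos ⟨hnil.mpr hl, h2⟩]
          rw [stepB, if_neg hI',
            if_neg (show ¬(l ≠ [] ∧ o = "D 1") from fun h => h1 h.2),
            if_pos ⟨hl, h2⟩]
          obtain ⟨m, hm⟩ : ∃ m, PySem.List.min? l (fun y => y) = some m := by
            cases hmx : PySem.List.min? l (fun y => y) with
            | none => exact absurd ((PySem.List.min?_eq_none_iff l _).mp hmx) hl
            | some m => exact ⟨m, rfl⟩
          have hmem : m ∈ l := PySem.List.min?_mem hm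
          rw [hm, Option.getD_some, PySem.List.remove?_eq_some_erase l m hmem, Option.getD_some]
          rw [sorted_erase_eq l m]
          rw [erase_min_eq_tail _ m hpair
            ((PySem.List.mem_sorted l _ false m).mpr hmem)
            (fun y hy => PySem.List.min?_isMin hm y ((PySem.List.mem_sorted l _ false y).mp hy))]
        · rw [stepA, if_neg hI,
            if_neg (show ¬((PySem.List.sorted l (fun y => y) false) ≠ [] ∧ o = "D 1") from fun h => h1 h.2),
            if_neg (show ¬((PySem.List.sorted l (fun y => y) false) ≠ [] ∧ o = "D -1") from fun h => h2 h.2)]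
          rw [stepB, if_neg hI',
            if_neg (show ¬(l ≠ [] ∧ o = "D 1") from fun h => h1 h.2),
            if_neg (show ¬(l ≠ [] ∧ o = "D -1") from fun h => h2 h.2)]

lemma fold_eq : ∀ (ops : List String) (l : List Int),
    ops.foldl stepA (PySem.List.sorted l (fun y => y) false)
      = PySem.List.sorted (ops.foldl stepB l) (fun y => y) false := by
  intro ops
  induction ops with
  | nil => intro l; rfl
  | cons o t ih =>
    intro l
    rw [List.foldl_cons, List.foldl_cons, step_eq, ih]

lemma pyGet_zero (q : List Int) (a : Int) (t : List Int) (h : q = a :: t) :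
    PySem.List.pyGet? q 0 = some a := by
  subst h; simp [PySem.List.pyGet?, PySem.List.pyIdx?]

lemma pyGet_neg_one (q : List Int) (h : q ≠ []) :
    PySem.List.pyGet? q (-1) = some (q.getLast h) := by
  simp [PySem.List.pyGet?, PySem.List.pyIdx?]
  rw [if_pos (show 1 ≤ q.length from List.length_pos_iff.mpr h)]
  simp [List.getLast_eq_getElem]

theorem ports_agree (ops : List String) : solution ops = solution_alt ops := by
  unfold solution solution_alt
  have hfold : ops.foldl stepA [] = PySem.List.sorted (ops.foldl stepB []) (fun y => y) false :=
    fold_eq ops []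
  rw [hfold]
  by_cases hnil : ops.foldl stepB [] = []
  · rw [hnil, show (PySem.List.sorted ([] : List Int) (fun y => y) false) = [] from rfl]
    simp
  · have hq : PySem.List.sorted (ops.foldl stepB []) (fun y => y) false ≠ [] :=
      fun h => hnil ((PySem.List.sorted_eq_nil_iff _ _ _).mp h)
    rw [if_pos hnil, if_neg hq]
    have hpair : (PySem.List.sorted (ops.foldl stepB []) (fun y => y) false).Pairwise (· ≤ ·) := by
      simpa using PySem.List.sorted_pairwise (ops.foldl stepB []) (fun y => y)
    obtain ⟨mx, hmx⟩ : ∃ m, PySem.List.max? (ops.foldl stepB []) (fun x => x) = some m := by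
      cases hmxx : PySem.List.max? (ops.foldl stepB []) (fun x => x) with
      | none => exact absurd ((PySem.List.max?_eq_none_iff _ _).mp hmxx) hnil
      | some m => exact ⟨m, rfl⟩
    obtain ⟨mn, hmn⟩ : ∃ m, PySem.List.min? (ops.foldl stepB []) (fun x => x) = some m := by
      cases hmnn : PySem.List.min? (ops.foldl stepB []) (fun x => x) with
      | none => exact absurd ((PySem.List.min?_eq_none_iff _ _).mp hmnn) hnil
      | some m => exact ⟨m, rfl⟩
    rw [hmx, hmn, Option.getD_some, Option.getD_some]
    rw [pyGet_neg_one _ hq]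
    obtain ⟨a, t, hat⟩ : ∃ a t, PySem.List.sorted (ops.foldl stepB []) (fun y => y) false = a :: t := by
      cases hc : PySem.List.sorted (ops.foldl stepB []) (fun y => y) false with
      | nil => exact absurd hc hq
      | cons a t => exact ⟨a, t, rfl⟩
    rw [pyGet_zero _ a t hat]
    have hlast_mem : (PySem.List.sorted (ops.foldl stepB []) (fun y => y) false).getLast hq
        ∈ ops.foldl stepB [] :=
      (PySem.List.mem_sorted _ _ _ _).mp (List.getLast_mem hq)
    have h1 : (PySem.List.sorted (ops.foldl stepB []) (fun y => y) false).getLast hq ≤ mx :=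
      PySem.List.max?_isMax hmx _ hlast_mem
    have h2 : mx ≤ (PySem.List.sorted (ops.foldl stepB []) (fun y => y) false).getLast hq :=
      last_is_max _ hpair hq mx ((PySem.List.mem_sorted _ _ _ _).mpr (PySem.List.max?_mem hmx))
    have h3 : a ≤ mn := by
      have := PySem.List.key_head_sorted_le _ _ hat
      exact this mn (PySem.List.min?_mem hmn)
    have h4 : mn ≤ a := PySem.List.min?_isMin hmn a
      ((PySem.List.mem_sorted _ _ _ _).mp (hat ▸ List.mem_cons_self))
    have e1 : (PySem.List.sorted (ops.foldl stepB []) (fun y => y) false).getLast hq = mx := le_antisymm h1 h2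
    have e2 : a = mn := le_antisymm h3 h4
    rw [Option.getD_some, Option.getD_some, e1, e2]

-- ===== VERDICT (by name: the statement is the Claim_ definition above) =====
theorem solution_spec : Claim_equal_solution := by
  intro operations _ _
  unfold Spec_solution
  exact ports_agree operations
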